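-- pv_equiv track=rewrite | github.com/vaibhav-jain-dev/learning-algo | problems/200-must-solve/arrays/02-sorted-squared-array/similar/01-merge-sorted-arrays-with-squares/python_code.py | merge_sorted_squares_heap
-- ===== SOURCE A (Python) =====
-- from typing import List
-- import heapq
--
-- def merge_sorted_squares_heap(arr1: List[int], arr2: List[int]) -> List[int]:
--     """
--     Use a min-heap to merge squared arrays.
--
--     Generalizeable to k sorted arrays.
--     """
--     def square_sorted(arr: List[int]) -> List[int]:
--         if not arr:
--             return []
--         n = len(arr)
--         result = [0] * n
--         left, right = 0, n - 1
--         pos = n - 1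
--
--         while left <= right:
--             left_sq, right_sq = arr[left] ** 2, arr[right] ** 2
--             if left_sq > right_sq:
--                 result[pos] = left_sq
--                 left += 1
--             else:
--                 result[pos] = right_sq
--                 right -= 1
--             pos -= 1
--         return result
--
--     sq1 = square_sorted(arr1)
--     sq2 = square_sorted(arr2)
--
--     # Use heap to merge (generalizable to k arrays)
--     result = []
--     heap = []
--
--     # Push first element of each array (value, array_index, position)
--     if sq1:
--         heapq.heappush(heap, (sq1[0], 0, 0))
--     if sq2:
--         heapq.heappush(heap, (sq2[0], 1, 0))
--
--     arrays = [sq1, sq2]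
--
--     while heap:
--         val, arr_idx, pos = heapq.heappop(heap)
--         result.append(val)
--
--         # Push next element from same array
--         if pos + 1 < len(arrays[arr_idx]):
--             heapq.heappush(heap, (arrays[arr_idx][pos + 1], arr_idx, pos + 1))
--
--     return result
-- ===== SOURCE B (Python) =====
-- from typing import List
--
-- def merge_sorted_squares_heap(arr1: List[int], arr2: List[int]) -> List[int]:
--     """Merge squared arrays with a classic two-pointer merge (no heap)."""
--     def square_sorted(arr: List[int]) -> List[int]:
--         res = []
--         left, right = 0, len(arr) - 1
--         while left <= right:
--             left_sq, right_sq = arr[left] ** 2, arr[right] ** 2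
--             if left_sq > right_sq:
--                 res.append(left_sq)
--                 left += 1
--             else:
--                 res.append(right_sq)
--                 right -= 1
--         res.reverse()
--         return res
--
--     sq1 = square_sorted(arr1)
--     sq2 = square_sorted(arr2)
--
--     merged = []
--     i = j = 0
--     while i < len(sq1) and j < len(sq2):
--         if sq1[i] <= sq2[j]:
--             merged.append(sq1[i])
--             i += 1
--         else:
--             merged.append(sq2[j])
--             j += 1
--     merged.extend(sq1[i:])
--     merged.extend(sq2[j:])
--     return merged
-- ===== Notes on version B (the rewrite author's own statement) =====
-- stated objective: simpler
-- what changed: The heap-based k-way merge (heapq with (value, array_index, position) triples) is replaced by a classic two-pointer merge of the two squared arrays, and the squaring helper builds its list by appending then reversing instead of writing into a preallocated array by index.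
import Mathlib
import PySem

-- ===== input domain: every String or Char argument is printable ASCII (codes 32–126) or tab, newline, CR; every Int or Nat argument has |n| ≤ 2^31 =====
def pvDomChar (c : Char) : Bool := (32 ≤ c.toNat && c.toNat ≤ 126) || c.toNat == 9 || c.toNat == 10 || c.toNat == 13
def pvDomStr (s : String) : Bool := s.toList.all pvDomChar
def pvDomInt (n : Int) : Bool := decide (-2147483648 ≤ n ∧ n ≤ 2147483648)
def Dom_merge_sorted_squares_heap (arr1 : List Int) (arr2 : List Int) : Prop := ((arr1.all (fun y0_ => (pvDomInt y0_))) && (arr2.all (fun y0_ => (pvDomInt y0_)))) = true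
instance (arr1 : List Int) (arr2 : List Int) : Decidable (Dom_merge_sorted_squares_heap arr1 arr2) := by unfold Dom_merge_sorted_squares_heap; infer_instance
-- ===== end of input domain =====

-- B replaces A's heapq-based merge of the two squared arrays with a classic two-pointer merge,
-- and builds each squared array by append-then-reverse instead of indexed writes (objective: simpler).


-- ===== PORT A =====
-- square_sorted's while loop; indices left/right/pos are always in range while the loop runs,
-- so pyGetD with default 0 and List.set at pos.toNat are exact for every reachable state.
-- fuel = number of remaining iterations (right - left + 1) is a totality guard only.
def pvSqLoopA (arr : List Int) (result : List Int) (left right pos : Int) : Nat → List Int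
  | 0 => result
  | fuel + 1 =>
    if left ≤ right then
      let left_sq := (PySem.List.pyGetD arr left 0) ^ 2
      let right_sq := (PySem.List.pyGetD arr right 0) ^ 2
      if left_sq > right_sq then
        pvSqLoopA arr (result.set pos.toNat left_sq) (left + 1) right (pos - 1) fuel
      else
        pvSqLoopA arr (result.set pos.toNat right_sq) left (right - 1) (pos - 1) fuel
    else result

def pvSquareSortedA (arr : List Int) : List Int :=
  if arr = [] then []
  else
    let n : Int := arr.length
    pvSqLoopA arr (List.replicate n.toNat 0) 0 (n - 1) (n - 1) n.toNat

-- heapq model: the heap is kept as a lex-sorted list of (value, array_index, position) triples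
-- (all triples are distinct in lex order, so heapq's pop order is exactly ascending lex order;
-- this hand port is exact for the observable push/pop behaviour).
def pvLexLt (a b : Int × Nat × Nat) : Bool :=
  a.1 < b.1 || (a.1 == b.1 && (a.2.1 < b.2.1 || (a.2.1 == b.2.1 && a.2.2 < b.2.2)))

def pvHeappush (heap : List (Int × Nat × Nat)) (x : Int × Nat × Nat) : List (Int × Nat × Nat) :=
  match heap with
  | [] => [x]
  | y :: rest => if pvLexLt x y then x :: y :: rest else y :: pvHeappush rest x

-- the while-heap loop; fuel = total number of elements is always sufficient
def pvMergeLoopA (arrays : List (List Int)) (heap : List (Int × Nat × Nat))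
    (result : List Int) : Nat → List Int
  | 0 => result
  | fuel + 1 =>
    match heap with
    | [] => result
    | (val, arr_idx, pos) :: rest =>
      let result := result ++ [val]
      let arr := arrays.getD arr_idx []
      let heap := if pos + 1 < arr.length then pvHeappush rest (arr.getD (pos + 1) 0, arr_idx, pos + 1) else rest
      pvMergeLoopA arrays heap result fuel

def merge_sorted_squares_heap (arr1 : List Int) (arr2 : List Int) : List Int :=
  let sq1 := pvSquareSortedA arr1
  let sq2 := pvSquareSortedA arr2
  let heap : List (Int × Nat × Nat) := []
  let heap := if sq1 ≠ [] then pvHeappush heap (sq1.getD 0 0, 0, 0) else heap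
  let heap := if sq2 ≠ [] then pvHeappush heap (sq2.getD 0 0, 1, 0) else heap
  let arrays := [sq1, sq2]
  pvMergeLoopA arrays heap [] (sq1.length + sq2.length)

-- ===== PORT B =====
-- fuel = number of remaining iterations is a totality guard only
def pvSqLoopB (arr : List Int) (res : List Int) (left right : Int) : Nat → List Int
  | 0 => res
  | fuel + 1 =>
    if left ≤ right then
      let left_sq := (PySem.List.pyGetD arr left 0) ^ 2
      let right_sq := (PySem.List.pyGetD arr right 0) ^ 2
      if left_sq > right_sq then
        pvSqLoopB arr (res ++ [left_sq]) (left + 1) right fuel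
      else
        pvSqLoopB arr (res ++ [right_sq]) left (right - 1) fuel
    else res

def pvSquareSortedB (arr : List Int) : List Int :=
  (pvSqLoopB arr [] 0 ((arr.length : Int) - 1) arr.length).reverse

-- two-pointer merge loop; sq[i:] with 0 ≤ i is List.drop; fuel is a totality guard
def pvMergeLoopB (sq1 sq2 : List Int) (merged : List Int) (i j : Nat) : Nat → List Int
  | 0 => merged ++ sq1.drop i ++ sq2.drop j
  | fuel + 1 =>
    if i < sq1.length ∧ j < sq2.length then
      if sq1.getD i 0 ≤ sq2.getD j 0 then
        pvMergeLoopB sq1 sq2 (merged ++ [sq1.getD i 0]) (i + 1) j fuel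
      else
        pvMergeLoopB sq1 sq2 (merged ++ [sq2.getD j 0]) i (j + 1) fuel
    else merged ++ sq1.drop i ++ sq2.drop j

def merge_sorted_squares_heap_alt (arr1 : List Int) (arr2 : List Int) : List Int :=
  let sq1 := pvSquareSortedB arr1
  let sq2 := pvSquareSortedB arr2
  pvMergeLoopB sq1 sq2 [] 0 0 (sq1.length + sq2.length)

-- ===== PRECONDITION & SPEC =====
def Spec_merge_sorted_squares_heap (arr1 : List Int) (arr2 : List Int) (out : List Int) : Prop := out = merge_sorted_squares_heap_alt arr1 arr2
instance (arr1 : List Int) (arr2 : List Int) (out : List Int) : Decidable (Spec_merge_sorted_squares_heap arr1 arr2 out) := by unfold Spec_merge_sorted_squares_heap; infer_instance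

-- ===== CLAIM (what is proved, stated in full; the proofs are below) =====
def Claim_equal_merge_sorted_squares_heap : Prop := ∀ (arr1 : List Int) (arr2 : List Int), Dom_merge_sorted_squares_heap arr1 arr2 → Spec_merge_sorted_squares_heap arr1 arr2 (merge_sorted_squares_heap arr1 arr2)

-- ===== LEMMAS AND PROOFS =====

-- B's loop with a non-empty accumulator just prefixes the accumulator
theorem pvSqLoopB_acc (arr : List Int) : ∀ (fuel : Nat) (res acc : List Int) (left right : Int),
    pvSqLoopB arr (res ++ acc) left right fuel = res ++ pvSqLoopB arr acc left right fuel := by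
  intro fuel
  induction fuel with
  | zero => intro res acc left right; rfl
  | succ fuel ih =>
      intro res acc left right
      rw [pvSqLoopB, pvSqLoopB]
      by_cases hle : left ≤ right
      · rw [if_pos hle, if_pos hle]
        by_cases hgt : (PySem.List.pyGetD arr left 0) ^ 2 > (PySem.List.pyGetD arr right 0) ^ 2
        · rw [if_pos hgt, if_pos hgt, List.append_assoc]
          exact ih _ _ _ _
        · rw [if_neg hgt, if_neg hgt, List.append_assoc]
          exact ih _ _ _ _
      · rw [if_neg hle, if_neg hle]

theorem drop_set_self (l : List Int) (p : Nat) (v : Int) (h : p < l.length) :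
    (l.set p v).drop p = v :: l.drop (p + 1) := by
  have h2 : p < (l.set p v).length := by simpa using h
  rw [List.drop_eq_getElem_cons h2, List.getElem_set_self, List.drop_set]
  simp

-- A's index-writing squaring loop equals B's append-then-reverse loop
theorem sqLoop_eq (arr : List Int) : ∀ (k : Nat) (left right : Int) (result : List Int),
    right - left + 1 = (k : Int) → 0 ≤ left → right < (result.length : Int) →
    pvSqLoopA arr result left right (right - left) k =
      (pvSqLoopB arr [] left right k).reverse ++ result.drop (right - left + 1).toNat := by
  intro k
  induction k with
  | zero =>
      intro left right result hk hl hr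
      rw [pvSqLoopA, pvSqLoopB]
      simp [show (right - left + 1).toNat = 0 by omega]
  | succ k ih =>
      intro left right result hk hl hr
      have hle : left ≤ right := by omega
      have hpl : (right - left).toNat < result.length := by omega
      rw [pvSqLoopA, if_pos hle, pvSqLoopB, if_pos hle]
      by_cases hgt : (PySem.List.pyGetD arr left 0) ^ 2 > (PySem.List.pyGetD arr right 0) ^ 2
      · rw [if_pos hgt, if_pos hgt]
        set v := (PySem.List.pyGetD arr left 0) ^ 2 with hv
        rw [show right - left - 1 = right - (left + 1) by ring]
        rw [ih (left + 1) right (result.set (right - left).toNat v) (by omega) (by omega)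
            (by simp; omega)]
        rw [show ([] : List Int) ++ [v] = [v] ++ [] by simp, pvSqLoopB_acc]
        rw [show (right - (left + 1) + 1).toNat = (right - left).toNat by omega,
          drop_set_self _ _ _ hpl]
        simp [show ((right - left + 1).toNat) = (right - left).toNat + 1 by omega]
      · rw [if_neg hgt, if_neg hgt]
        set v := (PySem.List.pyGetD arr right 0) ^ 2 with hv
        rw [show right - left - 1 = (right - 1) - left by ring]
        rw [ih left (right - 1) (result.set (right - left).toNat v) (by omega) (by omega)
            (by simp; omega)]
        rw [show ([] : List Int) ++ [v] = [v] ++ [] by simp, pvSqLoopB_acc]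
        rw [show (right - 1 - left + 1).toNat = (right - left).toNat by omega,
          drop_set_self _ _ _ hpl]
        simp [show ((right - left + 1).toNat) = (right - left).toNat + 1 by omega]

theorem sq_eq (arr : List Int) : pvSquareSortedA arr = pvSquareSortedB arr := by
  by_cases h : arr = []
  · subst h
    rw [pvSquareSortedA, if_pos rfl, pvSquareSortedB]
    rfl
  · have hn : 0 < arr.length := List.length_pos_iff.mpr h
    rw [pvSquareSortedA, if_neg h, pvSquareSortedB]
    show pvSqLoopA arr (List.replicate ((arr.length : Int)).toNat 0) 0 ((arr.length : Int) - 1)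
        ((arr.length : Int) - 1) ((arr.length : Int)).toNat =
      (pvSqLoopB arr [] 0 ((arr.length : Int) - 1) arr.length).reverse
    have key := sqLoop_eq arr arr.length 0 ((arr.length : Int) - 1)
      (List.replicate ((arr.length : Int)).toNat 0) (by omega) (by omega) (by simp)
    simp only [sub_zero] at key
    rw [show ((arr.length : Int)).toNat = arr.length by omega] at key ⊢
    rw [key]
    simp

-- the heap contents maintained by A's merge loop, as a function of the two front indices
def pvHeapOf (sq1 sq2 : List Int) (i j : Nat) : List (Int × Nat × Nat) :=
  if i < sq1.length then
    if j < sq2.length then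
      if sq1.getD i 0 ≤ sq2.getD j 0 then [(sq1.getD i 0, 0, i), (sq2.getD j 0, 1, j)]
      else [(sq2.getD j 0, 1, j), (sq1.getD i 0, 0, i)]
    else [(sq1.getD i 0, 0, i)]
  else if j < sq2.length then [(sq2.getD j 0, 1, j)] else []

theorem lexLt_01 (x y : Int) (i j : Nat) : pvLexLt (x, 0, i) (y, 1, j) = decide (x ≤ y) := by
  by_cases h : x ≤ y
  · rw [decide_eq_true h]
    simp [pvLexLt]
    omega
  · rw [decide_eq_false h]
    simp [pvLexLt]
    omega

theorem lexLt_10 (x y : Int) (i j : Nat) : pvLexLt (x, 1, i) (y, 0, j) = decide (x < y) := by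
  by_cases h : x < y
  · rw [decide_eq_true h]
    simp [pvLexLt]
    omega
  · rw [decide_eq_false h]
    simp [pvLexLt]
    omega

-- once one array is exhausted B's loop returns its exit expression at any fuel
theorem mergeB_out (sq1 sq2 : List Int) (acc : List Int) (i j : Nat) (fuel : Nat)
    (h : ¬ (i < sq1.length ∧ j < sq2.length)) :
    pvMergeLoopB sq1 sq2 acc i j fuel = acc ++ sq1.drop i ++ sq2.drop j := by
  cases fuel with
  | zero => rfl
  | succ fuel => rw [pvMergeLoopB, if_neg h]

theorem mergeB_skip1 (sq1 sq2 : List Int) (acc : List Int) (i j : Nat) (f1 f2 : Nat)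
    (hi : i < sq1.length) (hj : ¬ j < sq2.length) :
    pvMergeLoopB sq1 sq2 (acc ++ [sq1.getD i 0]) (i + 1) j f1 =
      pvMergeLoopB sq1 sq2 acc i j f2 := by
  rw [mergeB_out _ _ _ _ _ _ (by omega), mergeB_out _ _ _ _ _ _ (by omega)]
  rw [List.drop_eq_getElem_cons hi, List.getD_eq_getElem _ _ hi]
  simp

theorem mergeB_skip2 (sq1 sq2 : List Int) (acc : List Int) (i j : Nat) (f1 f2 : Nat)
    (hi : ¬ i < sq1.length) (hj : j < sq2.length) :
    pvMergeLoopB sq1 sq2 (acc ++ [sq2.getD j 0]) i (j + 1) f1 =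
      pvMergeLoopB sq1 sq2 acc i j f2 := by
  rw [mergeB_out _ _ _ _ _ _ (by omega), mergeB_out _ _ _ _ _ _ (by omega)]
  have e1 : List.drop i sq1 = [] := List.drop_eq_nil_of_le (by omega)
  have e2 : List.drop j sq2 = sq2.getD j 0 :: List.drop (j + 1) sq2 := by
    rw [List.drop_eq_getElem_cons hj, List.getD_eq_getElem _ _ hj]
  rw [e1, e2]
  simp

-- A's heap-merge loop equals B's two-pointer merge loop
theorem mergeLoop_eq (sq1 sq2 : List Int) : ∀ (fuel i j : Nat) (acc : List Int),
    (sq1.length - i) + (sq2.length - j) ≤ fuel →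
    pvMergeLoopA [sq1, sq2] (pvHeapOf sq1 sq2 i j) acc fuel =
      pvMergeLoopB sq1 sq2 acc i j fuel := by
  intro fuel
  induction fuel with
  | zero =>
      intro i j acc hf
      rw [pvMergeLoopA, pvMergeLoopB]
      rw [List.drop_eq_nil_of_le (by omega : sq1.length ≤ i),
        List.drop_eq_nil_of_le (by omega : sq2.length ≤ j)]
      simp
  | succ fuel ih =>
      intro i j acc hf
      by_cases hi : i < sq1.length
      · by_cases hj : j < sq2.length
        · by_cases hc : sq1.getD i 0 ≤ sq2.getD j 0
          · -- pop from sq1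
            rw [pvHeapOf, if_pos hi, if_pos hj, if_pos hc]
            rw [pvMergeLoopA]
            have hnew : (if i + 1 < ([sq1, sq2].getD 0 []).length then
                pvHeappush [(sq2.getD j 0, 1, j)]
                  (([sq1, sq2].getD 0 []).getD (i + 1) 0, 0, i + 1)
              else [(sq2.getD j 0, 1, j)]) = pvHeapOf sq1 sq2 (i + 1) j := by
              simp only [List.getD_cons_zero]
              by_cases hi1 : i + 1 < sq1.length
              · rw [if_pos hi1, pvHeapOf, if_pos hi1, if_pos hj, pvHeappush, lexLt_01]
                by_cases hc1 : sq1.getD (i + 1) 0 ≤ sq2.getD j 0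
                · rw [if_pos (decide_eq_true hc1), if_pos hc1]
                · rw [if_neg (by simp only [decide_eq_true_eq]; omega),
                    if_neg hc1, pvHeappush]
              · rw [if_neg hi1, pvHeapOf, if_neg hi1, if_pos hj]
            rw [hnew, ih (i + 1) j _ (by omega)]
            conv_rhs => rw [pvMergeLoopB]
            rw [if_pos ⟨hi, hj⟩, if_pos hc]
          · -- pop from sq2
            rw [pvHeapOf, if_pos hi, if_pos hj, if_neg hc]
            rw [pvMergeLoopA]
            have hnew : (if j + 1 < ([sq1, sq2].getD 1 []).length then
                pvHeappush [(sq1.getD i 0, 0, i)]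
                  (([sq1, sq2].getD 1 []).getD (j + 1) 0, 1, j + 1)
              else [(sq1.getD i 0, 0, i)]) = pvHeapOf sq1 sq2 i (j + 1) := by
              simp only [List.getD_cons_succ, List.getD_cons_zero]
              by_cases hj1 : j + 1 < sq2.length
              · rw [if_pos hj1, pvHeapOf, if_pos hi, if_pos hj1, pvHeappush, lexLt_10]
                by_cases hc1 : sq1.getD i 0 ≤ sq2.getD (j + 1) 0
                · rw [if_neg (by simp only [decide_eq_true_eq]; omega),
                    if_pos hc1, pvHeappush]
                · rw [if_pos (decide_eq_true (by omega)), if_neg hc1]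
              · rw [if_neg hj1, pvHeapOf, if_pos hi, if_neg hj1]
            rw [hnew, ih i (j + 1) _ (by omega)]
            conv_rhs => rw [pvMergeLoopB]
            rw [if_pos ⟨hi, hj⟩, if_neg hc]
        · -- only sq1 remains
          rw [pvHeapOf, if_pos hi, if_neg hj]
          rw [pvMergeLoopA]
          have hnew : (if i + 1 < ([sq1, sq2].getD 0 []).length then
              pvHeappush [] (([sq1, sq2].getD 0 []).getD (i + 1) 0, 0, i + 1)
            else []) = pvHeapOf sq1 sq2 (i + 1) j := by
            simp only [List.getD_cons_zero]
            by_cases hi1 : i + 1 < sq1.length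
            · rw [if_pos hi1, pvHeapOf, if_pos hi1, if_neg hj, pvHeappush]
            · rw [if_neg hi1, pvHeapOf, if_neg hi1, if_neg hj]
          rw [hnew, ih (i + 1) j _ (by omega)]
          exact mergeB_skip1 sq1 sq2 acc i j fuel (fuel + 1) hi hj
      · by_cases hj : j < sq2.length
        · -- only sq2 remains
          rw [pvHeapOf, if_neg hi, if_pos hj]
          rw [pvMergeLoopA]
          have hnew : (if j + 1 < ([sq1, sq2].getD 1 []).length then
              pvHeappush [] (([sq1, sq2].getD 1 []).getD (j + 1) 0, 1, j + 1)
            else []) = pvHeapOf sq1 sq2 i (j + 1) := by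
            simp only [List.getD_cons_succ, List.getD_cons_zero]
            by_cases hj1 : j + 1 < sq2.length
            · rw [if_pos hj1, pvHeapOf, if_neg hi, if_pos hj1, pvHeappush]
            · rw [if_neg hj1, pvHeapOf, if_neg hi, if_neg hj1]
          rw [hnew, ih i (j + 1) _ (by omega)]
          exact mergeB_skip2 sq1 sq2 acc i j fuel (fuel + 1) hi hj
        · rw [pvHeapOf, if_neg hi, if_neg hj, pvMergeLoopA,
            mergeB_out _ _ _ _ _ _ (by omega)]
          rw [List.drop_eq_nil_of_le (by omega : sq1.length ≤ i),
            List.drop_eq_nil_of_le (by omega : sq2.length ≤ j)]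
          simp

-- A's initial pushes build exactly pvHeapOf sq1 sq2 0 0
theorem init_heap (sq1 sq2 : List Int) :
    (if sq2 ≠ [] then
      pvHeappush (if sq1 ≠ [] then pvHeappush [] (sq1.getD 0 0, 0, 0) else [])
        (sq2.getD 0 0, 1, 0)
    else if sq1 ≠ [] then pvHeappush [] (sq1.getD 0 0, 0, 0) else []) =
      pvHeapOf sq1 sq2 0 0 := by
  by_cases h1 : sq1 = []
  · by_cases h2 : sq2 = []
    · subst h1; subst h2
      simp [pvHeapOf]
    · rw [if_pos h2, if_neg (by simp [h1]), pvHeappush, pvHeapOf,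
        if_neg (by simp [h1]), if_pos (List.length_pos_iff.mpr h2)]
  · by_cases h2 : sq2 = []
    · rw [if_neg (by simp [h2]), if_pos h1, pvHeappush, pvHeapOf,
        if_pos (List.length_pos_iff.mpr h1), if_neg (by simp [h2])]
    · rw [if_pos h2, if_pos h1, pvHeappush, pvHeappush, lexLt_10, pvHeapOf,
        if_pos (List.length_pos_iff.mpr h1), if_pos (List.length_pos_iff.mpr h2)]
      by_cases hc : sq1.getD 0 0 ≤ sq2.getD 0 0
      · rw [if_neg (by simp only [decide_eq_true_eq]; omega), if_pos hc, pvHeappush]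
      · rw [if_pos (decide_eq_true (by omega)), if_neg hc]

-- ===== VERDICT (by name: the statement is the Claim_ definition above) =====
theorem merge_sorted_squares_heap_spec : Claim_equal_merge_sorted_squares_heap := by
  intro arr1 arr2 _
  show merge_sorted_squares_heap arr1 arr2 = merge_sorted_squares_heap_alt arr1 arr2
  rw [merge_sorted_squares_heap, merge_sorted_squares_heap_alt]
  simp only [sq_eq]
  rw [init_heap]
  exact mergeLoop_eq (pvSquareSortedB arr1) (pvSquareSortedB arr2)
    ((pvSquareSortedB arr1).length + (pvSquareSortedB arr2).length) 0 0 [] (by omega)
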